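-- pv_equiv track=rewrite | github.com/MarkMakies/Glyph-Generator | src/create-unicode-glyphs.py | center_glyph
-- ===== SOURCE A (Python) =====
-- GRID_SIZE = 16
--
-- def center_glyph(binary_array):
--     """Centers a binary glyph in a 16x16 grid."""
--     rows = [i // GRID_SIZE for i, val in enumerate(binary_array) if val == 1]
--     cols = [i % GRID_SIZE for i, val in enumerate(binary_array) if val == 1]
--
--     if not rows or not cols:  # If no pixels are "on," return as is
--         return binary_array
--
--     min_row, max_row = min(rows), max(rows)
--     min_col, max_col = min(cols), max(cols)
--
--     glyph_height = max_row - min_row + 1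
--     glyph_width = max_col - min_col + 1
--
--     row_offset = (GRID_SIZE - glyph_height) // 2 - min_row
--     col_offset = (GRID_SIZE - glyph_width) // 2 - min_col
--
--     centered_array = [0] * (GRID_SIZE * GRID_SIZE)
--     for i, val in enumerate(binary_array):
--         if val == 1:
--             row, col = divmod(i, GRID_SIZE)
--             new_row, new_col = row + row_offset, col + col_offset
--             if 0 <= new_row < GRID_SIZE and 0 <= new_col < GRID_SIZE:
--                 centered_array[new_row * GRID_SIZE + new_col] = 1
--
--     return centered_array
-- ===== SOURCE B (Python) =====
-- GRID_SIZE = 16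
--
-- def center_glyph(binary_array):
--     """Centers a binary glyph in a 16x16 grid (output-driven rewrite)."""
--     on = [divmod(i, GRID_SIZE) for i, val in enumerate(binary_array) if val == 1]
--     if not on:
--         return binary_array
--
--     min_row = min(r for r, _ in on)
--     max_row = max(r for r, _ in on)
--     min_col = min(c for _, c in on)
--     max_col = max(c for _, c in on)
--
--     row_offset = (GRID_SIZE - (max_row - min_row + 1)) // 2 - min_row
--     col_offset = (GRID_SIZE - (max_col - min_col + 1)) // 2 - min_col
--
--     # iterate over the OUTPUT grid and pull the source pixel via the inverse shift
--     return [1 if (j // GRID_SIZE - row_offset, j % GRID_SIZE - col_offset) in on else 0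
--             for j in range(GRID_SIZE * GRID_SIZE)]
-- ===== Notes on version B (the rewrite author's own statement) =====
-- stated objective: alternative
-- what changed: B collects the on-pixel (row,col) coordinates in one pass and then generates the 256-cell output directly, deciding each target cell by an inverse-shift membership lookup, instead of A's building two parallel index lists and mutating a zeroed buffer with a per-pixel bounds-checked write loop.
import Mathlib
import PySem

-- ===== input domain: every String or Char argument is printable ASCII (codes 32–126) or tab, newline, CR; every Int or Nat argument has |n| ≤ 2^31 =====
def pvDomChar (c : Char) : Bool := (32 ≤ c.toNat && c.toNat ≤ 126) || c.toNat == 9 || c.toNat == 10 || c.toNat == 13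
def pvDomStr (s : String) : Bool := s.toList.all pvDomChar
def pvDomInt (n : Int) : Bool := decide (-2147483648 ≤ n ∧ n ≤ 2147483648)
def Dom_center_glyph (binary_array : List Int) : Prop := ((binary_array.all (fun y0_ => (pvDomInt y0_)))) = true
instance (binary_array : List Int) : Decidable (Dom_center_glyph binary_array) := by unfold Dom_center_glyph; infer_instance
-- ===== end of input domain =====

-- B re-implements the centering output-driven (pull each target cell from the shifted source
-- pixel list) instead of A's mutate-a-256-buffer write loop; objective: alternative, not faster.

-- ===== PORT A =====
-- loop body of A's 'for i, val in enumerate(binary_array)' write loop, kept as a helper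
def cgStep (row_offset col_offset : Int) (acc : List Int) (p : Int × Int) : List Int :=
  if p.2 == 1 then
    let row := PySem.Int.floordiv p.1 16
    let col := PySem.Int.mod p.1 16
    let new_row := row + row_offset
    let new_col := col + col_offset
    if 0 ≤ new_row ∧ new_row < 16 ∧ 0 ≤ new_col ∧ new_col < 16 then
      PySem.List.pySetD acc (new_row * 16 + new_col) 1   -- index is in [0,256): exact for centered_array[…] = 1
    else acc
  else acc

def center_glyph (binary_array : List Int) : List Int :=
  let en := PySem.List.enumerate binary_array
  let rows := (en.filter (fun p => p.2 == 1)).map (fun p => PySem.Int.floordiv p.1 16)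
  let cols := (en.filter (fun p => p.2 == 1)).map (fun p => PySem.Int.mod p.1 16)
  if rows = [] ∨ cols = [] then binary_array
  else
    -- min()/max() on lists proved nonempty by the guard; .getD 0 is unreachable
    let min_row := (PySem.List.min? rows (fun x => x)).getD 0
    let max_row := (PySem.List.max? rows (fun x => x)).getD 0
    let min_col := (PySem.List.min? cols (fun x => x)).getD 0
    let max_col := (PySem.List.max? cols (fun x => x)).getD 0
    let glyph_height := max_row - min_row + 1
    let glyph_width := max_col - min_col + 1
    let row_offset := PySem.Int.floordiv (16 - glyph_height) 2 - min_row
    let col_offset := PySem.Int.floordiv (16 - glyph_width) 2 - min_col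
    let centered := List.replicate 256 (0 : Int)
    en.foldl (cgStep row_offset col_offset) centered

-- ===== PORT B =====
-- '[divmod(i, 16) for i, val in enumerate(binary_array) if val == 1]' (divmod by 16 ≠ 0 is the floordiv/mod pair)
def cgOn (binary_array : List Int) : List (Int × Int) :=
  (PySem.List.enumerate binary_array).filterMap
    (fun p => if p.2 == 1 then some (PySem.Int.floordiv p.1 16, PySem.Int.mod p.1 16) else none)

def center_glyph_alt (binary_array : List Int) : List Int :=
  let on := cgOn binary_array
  if on = [] then binary_array
  else
    let min_row := (PySem.List.min? (on.map Prod.fst) (fun x => x)).getD 0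
    let max_row := (PySem.List.max? (on.map Prod.fst) (fun x => x)).getD 0
    let min_col := (PySem.List.min? (on.map Prod.snd) (fun x => x)).getD 0
    let max_col := (PySem.List.max? (on.map Prod.snd) (fun x => x)).getD 0
    let row_offset := PySem.Int.floordiv (16 - (max_row - min_row + 1)) 2 - min_row
    let col_offset := PySem.Int.floordiv (16 - (max_col - min_col + 1)) 2 - min_col
    (PySem.List.pyRange 0 256 1).map (fun j =>
      if (PySem.Int.floordiv j 16 - row_offset, PySem.Int.mod j 16 - col_offset) ∈ on then (1 : Int) else 0)

-- ===== PRECONDITION & SPEC =====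
def Spec_center_glyph (binary_array : List Int) (out : List Int) : Prop := out = center_glyph_alt binary_array
instance (binary_array : List Int) (out : List Int) : Decidable (Spec_center_glyph binary_array out) := by unfold Spec_center_glyph; infer_instance

-- ===== CLAIM (what is proved, stated in full; the proofs are below) =====
def Claim_equal_center_glyph : Prop := ∀ (binary_array : List Int), Dom_center_glyph binary_array → Spec_center_glyph binary_array (center_glyph binary_array)

-- ===== LEMMAS AND PROOFS =====

-- does pixel p of the source hit output cell k under A's shift-and-bounds-check?
def cgHit (row_offset col_offset : Int) (k : Nat) (p : Int × Int) : Bool :=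
  p.2 == 1 &&
    (decide (0 ≤ PySem.Int.floordiv p.1 16 + row_offset ∧ PySem.Int.floordiv p.1 16 + row_offset < 16 ∧
             0 ≤ PySem.Int.mod p.1 16 + col_offset ∧ PySem.Int.mod p.1 16 + col_offset < 16) &&
     (((PySem.Int.floordiv p.1 16 + row_offset) * 16 + (PySem.Int.mod p.1 16 + col_offset)).toNat == k))

theorem length_foldl_cgStep (l : List (Int × Int)) (ro co : Int) (acc : List Int) :
    (l.foldl (cgStep ro co) acc).length = acc.length := by
  induction l generalizing acc with
  | nil => rfl
  | cons p t ih =>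
    simp only [List.foldl_cons, ih]
    unfold cgStep
    dsimp only
    split <;> [skip; rfl]
    split <;> simp [PySem.List.length_pySetD]

theorem getElem?_foldl_cgStep (l : List (Int × Int)) (ro co : Int) (acc : List Int) (k : Nat)
    (h256 : acc.length = 256) (hk : k < 256) :
    (l.foldl (cgStep ro co) acc)[k]? = if l.any (cgHit ro co k) then some 1 else acc[k]? := by
  induction l generalizing acc with
  | nil => simp
  | cons p t ih =>
    have hstep_len : (cgStep ro co acc p).length = 256 := by
      unfold cgStep; dsimp only; split <;> [skip; exact h256]
      split <;> simp [PySem.List.length_pySetD, h256]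
    have hone : (cgStep ro co acc p)[k]? = if cgHit ro co k p then some 1 else acc[k]? := by
      unfold cgStep cgHit
      dsimp only
      rcases hv : (p.2 == 1) with _ | _
      · simp
      · simp only [if_true, Bool.true_and]
        split
        · rename_i hb
          have hnn : 0 ≤ (PySem.Int.floordiv p.1 16 + ro) * 16 + (PySem.Int.mod p.1 16 + co) := by
            obtain ⟨h1, h2, h3, h4⟩ := hb; nlinarith
          have hlt : ((PySem.Int.floordiv p.1 16 + ro) * 16 + (PySem.Int.mod p.1 16 + co)).toNat < 256 := by
            obtain ⟨h1, h2, h3, h4⟩ := hb; omega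
          rw [PySem.List.pySetD_of_nonneg _ _ hnn, List.getElem?_set]
          simp only [hb, h256, hlt, if_true]
          rcases he : (((PySem.Int.floordiv p.1 16 + ro) * 16 + (PySem.Int.mod p.1 16 + co)).toNat == k) with _ | _
          · simp_all
          · simp_all
        · rename_i hb
          have hdb : decide (0 ≤ PySem.Int.floordiv p.1 16 + ro ∧ PySem.Int.floordiv p.1 16 + ro < 16 ∧
              0 ≤ PySem.Int.mod p.1 16 + co ∧ PySem.Int.mod p.1 16 + co < 16) = false := by
            exact decide_eq_false hb
          simp only [hdb, Bool.false_and, Bool.false_eq_true, if_false]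
    simp only [List.foldl_cons, List.any_cons]
    rw [ih _ hstep_len]
    by_cases ht : t.any (cgHit ro co k) = true
    · simp [ht]
    · simp only [Bool.not_eq_true] at ht
      simp only [ht, Bool.or_false, if_neg (by simp : ¬ (false = true))]
      exact hone

theorem cgOn_map_fst (binary_array : List Int) :
    (cgOn binary_array).map Prod.fst
      = ((PySem.List.enumerate binary_array).filter (fun p => p.2 == 1)).map (fun p => PySem.Int.floordiv p.1 16) := by
  unfold cgOn
  induction PySem.List.enumerate binary_array with
  | nil => rfl
  | cons p t ih =>
    rw [List.filterMap_cons, List.filter_cons]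
    rcases h : (p.2 == 1) with _ | _
    · simp only [Bool.false_eq_true, if_false]
      exact ih
    · simp only [if_true, List.map_cons]
      rw [ih]

theorem cgOn_map_snd (binary_array : List Int) :
    (cgOn binary_array).map Prod.snd
      = ((PySem.List.enumerate binary_array).filter (fun p => p.2 == 1)).map (fun p => PySem.Int.mod p.1 16) := by
  unfold cgOn
  induction PySem.List.enumerate binary_array with
  | nil => rfl
  | cons p t ih =>
    rw [List.filterMap_cons, List.filter_cons]
    rcases h : (p.2 == 1) with _ | _
    · simp only [Bool.false_eq_true, if_false]
      exact ih
    · simp only [if_true, List.map_cons]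
      rw [ih]

theorem any_cgHit_iff (binary_array : List Int) (ro co : Int) (k : Nat) (hk : k < 256) :
    (PySem.List.enumerate binary_array).any (cgHit ro co k) = true
      ↔ ((k : Int) / 16 - ro, (k : Int) % 16 - co) ∈ cgOn binary_array := by
  unfold cgOn cgHit
  rw [List.any_eq_true]
  constructor
  · rintro ⟨p, hp, hhit⟩
    simp only [Bool.and_eq_true, beq_iff_eq, decide_eq_true_eq] at hhit
    obtain ⟨hv, ⟨h1, h2, h3, h4⟩, hkeq⟩ := hhit
    rw [List.mem_filterMap]
    refine ⟨p, hp, ?_⟩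
    simp only [hv, beq_self_eq_true, if_true, Option.some.injEq, Prod.mk.injEq]
    have hki : ((k : Int)) < 256 := by exact_mod_cast hk
    constructor <;> omega
  · intro hmem
    rw [List.mem_filterMap] at hmem
    obtain ⟨p, hp, hf⟩ := hmem
    refine ⟨p, hp, ?_⟩
    by_cases hv : p.2 == 1
    · simp only [hv, if_true, Option.some.injEq, Prod.mk.injEq] at hf
      obtain ⟨ha, hb⟩ := hf
      simp only [hv, Bool.true_and, Bool.and_eq_true, decide_eq_true_eq, beq_iff_eq]
      have hki : ((k : Int)) < 256 := by exact_mod_cast hk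
      have hm0 : 0 ≤ (k : Int) % 16 := by omega
      constructor <;> omega
    · simp [hv] at hf

theorem foldl_eq_map_pyRange (binary_array : List Int) (ro co : Int) :
    (PySem.List.enumerate binary_array).foldl (cgStep ro co) (List.replicate 256 (0 : Int))
      = (PySem.List.pyRange 0 256 1).map (fun j =>
          if (PySem.Int.floordiv j 16 - ro, PySem.Int.mod j 16 - co) ∈ cgOn binary_array then (1 : Int) else 0) := by
  apply List.ext_getElem?
  intro k
  by_cases hk : k < 256
  · rw [getElem?_foldl_cgStep _ _ _ _ _ (by rw [List.length_replicate]) hk]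
    rw [(by norm_num : (256 : Int) = ((256 : Nat) : Int)),
      PySem.List.getElem?_map_pyRange_zero _ 256 k hk]
    have h16 : (0:Int) < 16 := by norm_num
    rw [PySem.Int.floordiv_eq_ediv_of_pos h16, PySem.Int.mod_eq_emod_of_pos h16]
    by_cases hmem : ((k : Int) / 16 - ro, (k : Int) % 16 - co) ∈ cgOn binary_array
    · rw [if_pos hmem, if_pos ((any_cgHit_iff binary_array ro co k hk).2 hmem)]
    · rw [if_neg hmem, if_neg, List.getElem?_replicate, if_pos hk]
      intro hany
      exact hmem ((any_cgHit_iff binary_array ro co k hk).1 hany)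
  · rw [List.getElem?_eq_none, List.getElem?_eq_none]
    · simp only [List.length_map, PySem.List.length_pyRange_one]
      omega
    · rw [length_foldl_cgStep]
      simp only [List.length_replicate]
      omega

-- ===== VERDICT (by name: the statement is the Claim_ definition above) =====
theorem center_glyph_spec : Claim_equal_center_glyph := by
  intro binary_array _
  unfold Spec_center_glyph center_glyph center_glyph_alt
  dsimp only
  rw [← cgOn_map_fst, ← cgOn_map_snd]
  by_cases hon : cgOn binary_array = []
  · simp [hon]
  · have h1 : ¬ ((cgOn binary_array).map Prod.fst = [] ∨ (cgOn binary_array).map Prod.snd = []) := by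
      simp [hon]
    rw [if_neg h1, if_neg hon]
    exact foldl_eq_map_pyRange binary_array _ _
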